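-- pv_equiv track=rewrite | github.com/tushar-sikand-tcgls/liases-foras | app/services/system_prompt_service.py | apply_anti_hallucination_filters
-- ===== SOURCE A (Python) =====
-- def apply_anti_hallucination_filters(response: str) -> str:
--     """
--     Apply filters to prevent hallucination in responses
--
--     Args:
--         response: Raw response text
--
--     Returns:
--         Filtered response with hallucinations removed
--     """
--     # Remove any statements that appear to be estimates
--     filtered = response
--
--     # Remove phrases that indicate guessing
--     hallucination_phrases = [
--         "I estimate",
--         "probably",
--         "approximately",
--         "I guess",
--         "might be",
--         "could be around",
--         "seems like"
--     ]
--
--     for phrase in hallucination_phrases: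
--         filtered = filtered.replace(phrase, "[DATA REQUIRED]")
--
--     # Flag missing data explicitly
--     if "[DATA REQUIRED]" in filtered:
--         filtered += "\n\nNote: Some data points were not available from Layer 0 input."
--
--     return filtered
-- ===== SOURCE B (Python) =====
-- import re
--
-- _HALLUCINATION_PHRASES = [
--     "I estimate",
--     "probably",
--     "approximately",
--     "I guess",
--     "might be",
--     "could be around",
--     "seems like",
-- ]
-- _PATTERN = re.compile("|".join(re.escape(p) for p in _HALLUCINATION_PHRASES))
--
--
-- def apply_anti_hallucination_filters(response: str) -> str:
--     """Single-pass variant: one compiled alternation regex replaces every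
--     guessing phrase at once, instead of one str.replace pass per phrase."""
--     filtered = _PATTERN.sub("[DATA REQUIRED]", response)
--     if "[DATA REQUIRED]" in filtered:
--         filtered += "\n\nNote: Some data points were not available from Layer 0 input."
--     return filtered
-- ===== Notes on version B (the rewrite author's own statement) =====
-- stated objective: idiomatic
-- what changed: Replaces the seven sequential str.replace passes with one compiled alternation regex applied in a single left-to-right pass (re.sub), valid because the phrases never overlap and the sentinel contains no phrase.
import Mathlib
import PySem

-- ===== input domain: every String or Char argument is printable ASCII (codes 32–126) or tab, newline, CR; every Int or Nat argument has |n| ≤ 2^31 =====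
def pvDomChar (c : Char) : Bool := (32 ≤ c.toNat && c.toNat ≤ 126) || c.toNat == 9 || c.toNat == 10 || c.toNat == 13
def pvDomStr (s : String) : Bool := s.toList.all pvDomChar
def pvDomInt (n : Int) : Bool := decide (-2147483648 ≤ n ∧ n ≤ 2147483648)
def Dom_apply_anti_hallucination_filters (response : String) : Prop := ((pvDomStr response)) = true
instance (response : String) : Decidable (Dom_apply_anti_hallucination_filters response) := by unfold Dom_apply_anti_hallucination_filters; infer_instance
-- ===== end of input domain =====

-- B replaces A's seven sequential str.replace passes by ONE left-to-right scan (a compiled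
-- alternation regex in Python); equivalent because the phrases never overlap and the sentinel
-- contains no phrase. Objective: idiomatic single pass.

-- ===== PORT A =====
def apply_anti_hallucination_filters (response : String) : String :=
  -- for phrase in hallucination_phrases: filtered = filtered.replace(phrase, "[DATA REQUIRED]")
  let filtered :=
    ["I estimate", "probably", "approximately", "I guess", "might be", "could be around",
      "seems like"].foldl (fun f p => PySem.Str.replace f p "[DATA REQUIRED]") response
  if PySem.Str.isIn "[DATA REQUIRED]" filtered = true then
    filtered ++ "\n\nNote: Some data points were not available from Layer 0 input."
  else filtered

-- ===== PORT B =====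
def pvSent : List Char := "[DATA REQUIRED]".toList
def pvPhrases : List (List Char) :=
  ["I estimate".toList, "probably".toList, "approximately".toList, "I guess".toList,
    "might be".toList, "could be around".toList, "seems like".toList]

-- Hand port of `re.sub(pattern, "[DATA REQUIRED]", response)` where pattern is the alternation of
-- the re.escape'd phrases: scan left to right; at each position try the alternatives in order;
-- on a match emit the sentinel and jump past the match, otherwise keep the char and advance.
-- Exact: the phrases are escaped literals, so the regex engine does exactly this.
def pvScan (l : List Char) : List Char :=
  match l with
  | [] => []
  | c :: t =>
    match h : pvPhrases.find? (fun p => p.isPrefixOf (c :: t)) with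
    | some p => pvSent ++ pvScan ((c :: t).drop p.length)
    | none => c :: pvScan t
termination_by l.length
decreasing_by
  · have hmem := List.mem_of_find?_eq_some h
    have hlen : ∀ q ∈ pvPhrases, 1 ≤ q.length := by decide
    have := hlen p hmem
    simp [List.length_drop]
    omega
  · simp

def apply_anti_hallucination_filters_alt (response : String) : String :=
  let filtered := String.ofList (pvScan response.toList)
  if PySem.Str.isIn "[DATA REQUIRED]" filtered = true then
    filtered ++ "\n\nNote: Some data points were not available from Layer 0 input."
  else filtered

-- ===== PRECONDITION & SPEC =====
def Spec_apply_anti_hallucination_filters (response : String) (out : String) : Prop := out = apply_anti_hallucination_filters_alt response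
instance (response : String) (out : String) : Decidable (Spec_apply_anti_hallucination_filters response out) := by unfold Spec_apply_anti_hallucination_filters; infer_instance

-- ===== CLAIM (what is proved, stated in full; the proofs are below) =====
def Claim_equal_apply_anti_hallucination_filters : Prop := ∀ (response : String), Dom_apply_anti_hallucination_filters response → Spec_apply_anti_hallucination_filters response (apply_anti_hallucination_filters response)

-- ===== LEMMAS AND PROOFS =====

-- A clean restatement of PySem.Chars.replace's recursion (old nonempty): used to reason about A.
def pvRep (old new l : List Char) : List Char :=
  match l with
  | [] => []
  | c :: t =>
    if h : old ≠ [] ∧ old.isPrefixOf (c :: t) = true then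
      new ++ pvRep old new ((c :: t).drop old.length)
    else c :: pvRep old new t
termination_by l.length
decreasing_by
  · have : 1 ≤ old.length := by
      cases hh : old with
      | nil => exact absurd hh h.1
      | cons a b => simp
    simp [List.length_drop]
    omega
  · simp

lemma pvRep_cons_neg (old new : List Char) (c : Char) (t : List Char)
    (h : old.isPrefixOf (c :: t) = false) :
    pvRep old new (c :: t) = c :: pvRep old new t := by
  rw [pvRep]
  rw [dif_neg]
  simp [h]

lemma pvRep_pos (old new l : List Char) (hold : old ≠ []) (h : old.isPrefixOf l = true) :
    pvRep old new l = new ++ pvRep old new (l.drop old.length) := by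
  cases l with
  | nil =>
    cases old with
    | nil => exact absurd rfl hold
    | cons a b => simp [List.isPrefixOf] at h
  | cons c t =>
    rw [pvRep]
    rw [dif_pos ⟨hold, h⟩]

lemma pv_go_eq (old new : List Char) (hold : old ≠ []) :
    ∀ fuel l acc, l.length ≤ fuel →
      PySem.Chars.replace.go old new fuel l acc = acc.reverse ++ pvRep old new l := by
  intro fuel
  induction fuel with
  | zero =>
    intro l acc hl
    have : l = [] := by
      cases l with
      | nil => rfl
      | cons a b => simp at hl
    subst this
    simp [PySem.Chars.replace.go, pvRep]
  | succ n ih =>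
    intro l acc hl
    cases l with
    | nil => simp [PySem.Chars.replace.go, pvRep]
    | cons c t =>
      rw [PySem.Chars.replace.go]
      by_cases h : old.isPrefixOf (c :: t) = true
      · rw [if_pos h, ih _ _ (by
          have : 1 ≤ old.length := by
            cases hh : old with
            | nil => exact absurd hh hold
            | cons a b => simp
          simp at hl ⊢
          omega)]
        rw [pvRep_pos old new _ hold h]
        simp
      · rw [if_neg h, ih _ _ (by simp at hl ⊢; omega)]
        rw [pvRep_cons_neg old new c t (eq_false_of_ne_true h)]
        simp

lemma pv_replace_eq (l old new : List Char) (hold : old ≠ []) :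
    PySem.Chars.replace l old new = pvRep old new l := by
  rw [PySem.Chars.replace]
  rw [if_neg (by simpa using hold)]
  simpa using pv_go_eq old new hold l.length l [] le_rfl

-- p never matches strictly inside or at the start of q (for any continuation), so the
-- replacement pass for p slides over the prefix q unchanged.
lemma pv_pass (p n q : List Char)
    (hov : ∀ k, k < q.length → (p.take (q.length - k)).isPrefixOf (q.drop k) = false) :
    ∀ w, pvRep p n (q ++ w) = q ++ pvRep p n w := by
  induction q with
  | nil => intro w; simp
  | cons c q' ih =>
    intro w
    have hnp : p.isPrefixOf (c :: q' ++ w) = false := by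
      rw [Bool.eq_false_iff]
      intro hcon
      have hpre : p <+: (c :: q') ++ w := List.isPrefixOf_iff_prefix.mp hcon
      have h1 : (p.take (c :: q').length).isPrefixOf (c :: q') = true := by
        rw [List.isPrefixOf_iff_prefix]
        have := List.IsPrefix.take hpre (c :: q').length
        rwa [List.take_left] at this
      have h0 := hov 0 (by simp)
      simp only [Nat.sub_zero, List.drop_zero] at h0
      rw [h0] at h1
      exact Bool.false_ne_true h1
    rw [List.cons_append, pvRep_cons_neg p n c (q' ++ w) hnp]
    rw [ih (by
      intro k hk
      have := hov (k + 1) (by simpa using Nat.succ_lt_succ hk)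
      simpa using this)]
    simp

lemma pv_head (p n : List Char) (hp : p ≠ []) :
    ∀ w, pvRep p n (p ++ w) = n ++ pvRep p n w := by
  intro w
  rw [pvRep_pos p n _ hp (by rw [List.isPrefixOf_iff_prefix]; exact ⟨w, rfl⟩)]
  rw [List.drop_left]

-- No replacement creates a new occurrence of a phrase tail: the sentinel starts with '[',
-- which no phrase contains.
lemma pv_no_create (p : List Char) (ch : Char) (n' l sub : List Char) (hp : p ≠ [])
    (hch : ch ∉ sub) :
    sub.isPrefixOf (pvRep p (ch :: n') l) = true → sub.isPrefixOf l = true := by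
  have main : ∀ m (l sub : List Char), l.length ≤ m → ch ∉ sub →
      sub.isPrefixOf (pvRep p (ch :: n') l) = true → sub.isPrefixOf l = true := by
    intro m
    induction m with
    | zero =>
      intro l sub hl _ h
      have : l = [] := by cases l with | nil => rfl | cons a b => simp at hl
      subst this
      simpa [pvRep] using h
    | succ k ih =>
      intro l sub hl hsub h
      cases l with
      | nil => simpa [pvRep] using h
      | cons c t =>
        by_cases hpre : p.isPrefixOf (c :: t) = true
        · rw [pvRep_pos p _ _ hp hpre] at h
          cases sub with
          | nil => simp [List.isPrefixOf]
          | cons s0 sub' =>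
            simp only [List.cons_append, List.isPrefixOf, Bool.and_eq_true, beq_iff_eq] at h
            exact absurd (h.1 ▸ List.mem_cons_self) hsub
        · rw [pvRep_cons_neg p _ c t (eq_false_of_ne_true hpre)] at h
          cases sub with
          | nil => simp [List.isPrefixOf]
          | cons s0 sub' =>
            simp only [List.isPrefixOf, Bool.and_eq_true, beq_iff_eq] at h ⊢
            exact ⟨h.1, ih t sub' (by simp at hl; omega)
              (fun hm => hsub (List.mem_cons_of_mem _ hm)) h.2⟩
  exact main l.length l sub le_rfl hch

-- When no remaining phrase matches at the head, the whole chain of replacement passes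
-- preserves the head character.
lemma pv_chain_cons (ps : List (List Char)) (c : Char) (t : List Char)
    (h : ∀ p ∈ ps, p ≠ [] ∧ '[' ∉ p ∧ p.isPrefixOf (c :: t) = false) :
    ps.foldl (fun f p => pvRep p pvSent f) (c :: t)
      = c :: ps.foldl (fun f p => pvRep p pvSent f) t := by
  induction ps generalizing t with
  | nil => simp
  | cons p ps' ih =>
    obtain ⟨hp, hbr, hnp⟩ := h p List.mem_cons_self
    simp only [List.foldl_cons]
    rw [pvRep_cons_neg p pvSent c t hnp]
    rw [ih (pvRep p pvSent t) (by
      intro p' hp'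
      obtain ⟨h1, h2, h3⟩ := h p' (List.mem_cons_of_mem _ hp')
      refine ⟨h1, h2, ?_⟩
      by_contra hcon
      have hcon' : p'.isPrefixOf (c :: pvRep p pvSent t) = true := by
        simpa using eq_true_of_ne_false hcon
      rw [show (c :: pvRep p pvSent t) = pvRep p pvSent (c :: t) from
        (pvRep_cons_neg p pvSent c t hnp).symm] at hcon'
      have := pv_no_create p '[' ("DATA REQUIRED]".toList) (c :: t) p' hp
        (by
          intro hmem
          exact h2 hmem) hcon'
      rw [h3] at this
      exact Bool.false_ne_true this)]


-- Unfolding lemmas for pvScan's dependent match.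
lemma pvScan_match (c : Char) (t : List Char) (p : List Char)
    (hf : pvPhrases.find? (fun q => q.isPrefixOf (c :: t)) = some p) :
    pvScan (c :: t) = pvSent ++ pvScan ((c :: t).drop p.length) := by
  rw [pvScan]
  split
  · rename_i p' hp'
    rw [hf] at hp'
    cases hp'
    rfl
  · rename_i hp'
    rw [hf] at hp'
    cases hp'

lemma pvScan_none (c : Char) (t : List Char)
    (hf : pvPhrases.find? (fun q => q.isPrefixOf (c :: t)) = none) :
    pvScan (c :: t) = c :: pvScan t := by
  rw [pvScan]
  split
  · rename_i p' hp'
    rw [hf] at hp'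
    cases hp'
  · rfl

lemma pv_case (k : Nat)
    (ih : ∀ s : List Char, s.length ≤ k →
      pvPhrases.foldl (fun f p => pvRep p pvSent f) s = pvScan s)
    (c : Char) (t : List Char) (hs : (c :: t).length ≤ k + 1) :
    pvPhrases.foldl (fun f p => pvRep p pvSent f) (c :: t) = pvScan (c :: t) := by
  by_cases h1 : ("I estimate".toList).isPrefixOf (c :: t) = true
  · obtain ⟨w, hw⟩ : ∃ w, "I estimate".toList ++ w = c :: t := List.isPrefixOf_iff_prefix.mp h1
    have hwlen : w.length ≤ k := by
      have := congrArg List.length hw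
      simp at this hs
      omega
    have hf : pvPhrases.find? (fun q => q.isPrefixOf (c :: t)) = some ("I estimate".toList) := by
      simp only [pvPhrases, List.find?_cons, h1]
    rw [pvScan_match c t _ hf]
    rw [← hw]
    simp only [pvPhrases, List.foldl_cons, List.foldl_nil]
    rw [pv_head "I estimate".toList pvSent (by decide)]
    rw [pv_pass "probably".toList pvSent pvSent (by decide)]
    rw [pv_pass "approximately".toList pvSent pvSent (by decide)]
    rw [pv_pass "I guess".toList pvSent pvSent (by decide)]
    rw [pv_pass "might be".toList pvSent pvSent (by decide)]
    rw [pv_pass "could be around".toList pvSent pvSent (by decide)]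
    rw [pv_pass "seems like".toList pvSent pvSent (by decide)]
    have hfold : pvPhrases.foldl (fun f p => pvRep p pvSent f) w = pvRep "seems like".toList pvSent (pvRep "could be around".toList pvSent (pvRep "might be".toList pvSent (pvRep "I guess".toList pvSent (pvRep "approximately".toList pvSent (pvRep "probably".toList pvSent (pvRep "I estimate".toList pvSent w)))))) := by
      simp only [pvPhrases, List.foldl_cons, List.foldl_nil]
    rw [← hfold, ih w hwlen, List.drop_left]
  by_cases h2 : ("probably".toList).isPrefixOf (c :: t) = true
  · obtain ⟨w, hw⟩ : ∃ w, "probably".toList ++ w = c :: t := List.isPrefixOf_iff_prefix.mp h2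
    have hwlen : w.length ≤ k := by
      have := congrArg List.length hw
      simp at this hs
      omega
    have hf : pvPhrases.find? (fun q => q.isPrefixOf (c :: t)) = some ("probably".toList) := by
      simp only [pvPhrases, List.find?_cons, eq_false_of_ne_true h1, h2]
    rw [pvScan_match c t _ hf]
    rw [← hw]
    simp only [pvPhrases, List.foldl_cons, List.foldl_nil]
    rw [pv_pass "I estimate".toList pvSent "probably".toList (by decide)]
    rw [pv_head "probably".toList pvSent (by decide)]
    rw [pv_pass "approximately".toList pvSent pvSent (by decide)]
    rw [pv_pass "I guess".toList pvSent pvSent (by decide)]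
    rw [pv_pass "might be".toList pvSent pvSent (by decide)]
    rw [pv_pass "could be around".toList pvSent pvSent (by decide)]
    rw [pv_pass "seems like".toList pvSent pvSent (by decide)]
    have hfold : pvPhrases.foldl (fun f p => pvRep p pvSent f) w = pvRep "seems like".toList pvSent (pvRep "could be around".toList pvSent (pvRep "might be".toList pvSent (pvRep "I guess".toList pvSent (pvRep "approximately".toList pvSent (pvRep "probably".toList pvSent (pvRep "I estimate".toList pvSent w)))))) := by
      simp only [pvPhrases, List.foldl_cons, List.foldl_nil]
    rw [← hfold, ih w hwlen, List.drop_left]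
  by_cases h3 : ("approximately".toList).isPrefixOf (c :: t) = true
  · obtain ⟨w, hw⟩ : ∃ w, "approximately".toList ++ w = c :: t := List.isPrefixOf_iff_prefix.mp h3
    have hwlen : w.length ≤ k := by
      have := congrArg List.length hw
      simp at this hs
      omega
    have hf : pvPhrases.find? (fun q => q.isPrefixOf (c :: t)) = some ("approximately".toList) := by
      simp only [pvPhrases, List.find?_cons, eq_false_of_ne_true h1, eq_false_of_ne_true h2, h3]
    rw [pvScan_match c t _ hf]
    rw [← hw]
    simp only [pvPhrases, List.foldl_cons, List.foldl_nil]
    rw [pv_pass "I estimate".toList pvSent "approximately".toList (by decide)]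
    rw [pv_pass "probably".toList pvSent "approximately".toList (by decide)]
    rw [pv_head "approximately".toList pvSent (by decide)]
    rw [pv_pass "I guess".toList pvSent pvSent (by decide)]
    rw [pv_pass "might be".toList pvSent pvSent (by decide)]
    rw [pv_pass "could be around".toList pvSent pvSent (by decide)]
    rw [pv_pass "seems like".toList pvSent pvSent (by decide)]
    have hfold : pvPhrases.foldl (fun f p => pvRep p pvSent f) w = pvRep "seems like".toList pvSent (pvRep "could be around".toList pvSent (pvRep "might be".toList pvSent (pvRep "I guess".toList pvSent (pvRep "approximately".toList pvSent (pvRep "probably".toList pvSent (pvRep "I estimate".toList pvSent w)))))) := by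
      simp only [pvPhrases, List.foldl_cons, List.foldl_nil]
    rw [← hfold, ih w hwlen, List.drop_left]
  by_cases h4 : ("I guess".toList).isPrefixOf (c :: t) = true
  · obtain ⟨w, hw⟩ : ∃ w, "I guess".toList ++ w = c :: t := List.isPrefixOf_iff_prefix.mp h4
    have hwlen : w.length ≤ k := by
      have := congrArg List.length hw
      simp at this hs
      omega
    have hf : pvPhrases.find? (fun q => q.isPrefixOf (c :: t)) = some ("I guess".toList) := by
      simp only [pvPhrases, List.find?_cons, eq_false_of_ne_true h1, eq_false_of_ne_true h2, eq_false_of_ne_true h3, h4]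
    rw [pvScan_match c t _ hf]
    rw [← hw]
    simp only [pvPhrases, List.foldl_cons, List.foldl_nil]
    rw [pv_pass "I estimate".toList pvSent "I guess".toList (by decide)]
    rw [pv_pass "probably".toList pvSent "I guess".toList (by decide)]
    rw [pv_pass "approximately".toList pvSent "I guess".toList (by decide)]
    rw [pv_head "I guess".toList pvSent (by decide)]
    rw [pv_pass "might be".toList pvSent pvSent (by decide)]
    rw [pv_pass "could be around".toList pvSent pvSent (by decide)]
    rw [pv_pass "seems like".toList pvSent pvSent (by decide)]
    have hfold : pvPhrases.foldl (fun f p => pvRep p pvSent f) w = pvRep "seems like".toList pvSent (pvRep "could be around".toList pvSent (pvRep "might be".toList pvSent (pvRep "I guess".toList pvSent (pvRep "approximately".toList pvSent (pvRep "probably".toList pvSent (pvRep "I estimate".toList pvSent w)))))) := by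
      simp only [pvPhrases, List.foldl_cons, List.foldl_nil]
    rw [← hfold, ih w hwlen, List.drop_left]
  by_cases h5 : ("might be".toList).isPrefixOf (c :: t) = true
  · obtain ⟨w, hw⟩ : ∃ w, "might be".toList ++ w = c :: t := List.isPrefixOf_iff_prefix.mp h5
    have hwlen : w.length ≤ k := by
      have := congrArg List.length hw
      simp at this hs
      omega
    have hf : pvPhrases.find? (fun q => q.isPrefixOf (c :: t)) = some ("might be".toList) := by
      simp only [pvPhrases, List.find?_cons, eq_false_of_ne_true h1, eq_false_of_ne_true h2, eq_false_of_ne_true h3, eq_false_of_ne_true h4, h5]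
    rw [pvScan_match c t _ hf]
    rw [← hw]
    simp only [pvPhrases, List.foldl_cons, List.foldl_nil]
    rw [pv_pass "I estimate".toList pvSent "might be".toList (by decide)]
    rw [pv_pass "probably".toList pvSent "might be".toList (by decide)]
    rw [pv_pass "approximately".toList pvSent "might be".toList (by decide)]
    rw [pv_pass "I guess".toList pvSent "might be".toList (by decide)]
    rw [pv_head "might be".toList pvSent (by decide)]
    rw [pv_pass "could be around".toList pvSent pvSent (by decide)]
    rw [pv_pass "seems like".toList pvSent pvSent (by decide)]
    have hfold : pvPhrases.foldl (fun f p => pvRep p pvSent f) w = pvRep "seems like".toList pvSent (pvRep "could be around".toList pvSent (pvRep "might be".toList pvSent (pvRep "I guess".toList pvSent (pvRep "approximately".toList pvSent (pvRep "probably".toList pvSent (pvRep "I estimate".toList pvSent w)))))) := by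
      simp only [pvPhrases, List.foldl_cons, List.foldl_nil]
    rw [← hfold, ih w hwlen, List.drop_left]
  by_cases h6 : ("could be around".toList).isPrefixOf (c :: t) = true
  · obtain ⟨w, hw⟩ : ∃ w, "could be around".toList ++ w = c :: t := List.isPrefixOf_iff_prefix.mp h6
    have hwlen : w.length ≤ k := by
      have := congrArg List.length hw
      simp at this hs
      omega
    have hf : pvPhrases.find? (fun q => q.isPrefixOf (c :: t)) = some ("could be around".toList) := by
      simp only [pvPhrases, List.find?_cons, eq_false_of_ne_true h1, eq_false_of_ne_true h2, eq_false_of_ne_true h3, eq_false_of_ne_true h4, eq_false_of_ne_true h5, h6]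
    rw [pvScan_match c t _ hf]
    rw [← hw]
    simp only [pvPhrases, List.foldl_cons, List.foldl_nil]
    rw [pv_pass "I estimate".toList pvSent "could be around".toList (by decide)]
    rw [pv_pass "probably".toList pvSent "could be around".toList (by decide)]
    rw [pv_pass "approximately".toList pvSent "could be around".toList (by decide)]
    rw [pv_pass "I guess".toList pvSent "could be around".toList (by decide)]
    rw [pv_pass "might be".toList pvSent "could be around".toList (by decide)]
    rw [pv_head "could be around".toList pvSent (by decide)]
    rw [pv_pass "seems like".toList pvSent pvSent (by decide)]
    have hfold : pvPhrases.foldl (fun f p => pvRep p pvSent f) w = pvRep "seems like".toList pvSent (pvRep "could be around".toList pvSent (pvRep "might be".toList pvSent (pvRep "I guess".toList pvSent (pvRep "approximately".toList pvSent (pvRep "probably".toList pvSent (pvRep "I estimate".toList pvSent w)))))) := by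
      simp only [pvPhrases, List.foldl_cons, List.foldl_nil]
    rw [← hfold, ih w hwlen, List.drop_left]
  by_cases h7 : ("seems like".toList).isPrefixOf (c :: t) = true
  · obtain ⟨w, hw⟩ : ∃ w, "seems like".toList ++ w = c :: t := List.isPrefixOf_iff_prefix.mp h7
    have hwlen : w.length ≤ k := by
      have := congrArg List.length hw
      simp at this hs
      omega
    have hf : pvPhrases.find? (fun q => q.isPrefixOf (c :: t)) = some ("seems like".toList) := by
      simp only [pvPhrases, List.find?_cons, eq_false_of_ne_true h1, eq_false_of_ne_true h2, eq_false_of_ne_true h3, eq_false_of_ne_true h4, eq_false_of_ne_true h5, eq_false_of_ne_true h6, h7]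
    rw [pvScan_match c t _ hf]
    rw [← hw]
    simp only [pvPhrases, List.foldl_cons, List.foldl_nil]
    rw [pv_pass "I estimate".toList pvSent "seems like".toList (by decide)]
    rw [pv_pass "probably".toList pvSent "seems like".toList (by decide)]
    rw [pv_pass "approximately".toList pvSent "seems like".toList (by decide)]
    rw [pv_pass "I guess".toList pvSent "seems like".toList (by decide)]
    rw [pv_pass "might be".toList pvSent "seems like".toList (by decide)]
    rw [pv_pass "could be around".toList pvSent "seems like".toList (by decide)]
    rw [pv_head "seems like".toList pvSent (by decide)]
    have hfold : pvPhrases.foldl (fun f p => pvRep p pvSent f) w = pvRep "seems like".toList pvSent (pvRep "could be around".toList pvSent (pvRep "might be".toList pvSent (pvRep "I guess".toList pvSent (pvRep "approximately".toList pvSent (pvRep "probably".toList pvSent (pvRep "I estimate".toList pvSent w)))))) := by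
      simp only [pvPhrases, List.foldl_cons, List.foldl_nil]
    rw [← hfold, ih w hwlen, List.drop_left]
  · have hall : ∀ p ∈ pvPhrases, p ≠ [] ∧ '[' ∉ p ∧ p.isPrefixOf (c :: t) = false := by
      intro p hp
      fin_cases hp
      · exact ⟨by decide, by decide, eq_false_of_ne_true h1⟩
      · exact ⟨by decide, by decide, eq_false_of_ne_true h2⟩
      · exact ⟨by decide, by decide, eq_false_of_ne_true h3⟩
      · exact ⟨by decide, by decide, eq_false_of_ne_true h4⟩
      · exact ⟨by decide, by decide, eq_false_of_ne_true h5⟩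
      · exact ⟨by decide, by decide, eq_false_of_ne_true h6⟩
      · exact ⟨by decide, by decide, eq_false_of_ne_true h7⟩
    rw [pv_chain_cons pvPhrases c t hall]
    rw [ih t (by simp at hs; omega)]
    have hf : pvPhrases.find? (fun q => q.isPrefixOf (c :: t)) = none := by
      simp only [pvPhrases, List.find?_cons, List.find?_nil, eq_false_of_ne_true h1, eq_false_of_ne_true h2, eq_false_of_ne_true h3, eq_false_of_ne_true h4, eq_false_of_ne_true h5, eq_false_of_ne_true h6, eq_false_of_ne_true h7]
    rw [pvScan_none c t hf]

-- The main list-level fact: the seven sequential passes equal the single scan.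
lemma pv_chain_eq_scan : ∀ s : List Char,
    pvPhrases.foldl (fun f p => pvRep p pvSent f) s = pvScan s := by
  have main : ∀ m (s : List Char), s.length ≤ m →
      pvPhrases.foldl (fun f p => pvRep p pvSent f) s = pvScan s := by
    intro m
    induction m with
    | zero =>
      intro s hs
      have : s = [] := by cases s with | nil => rfl | cons a b => simp at hs
      subst this
      simp [pvScan, pvPhrases, pvRep]
    | succ k ih =>
      intro s hs
      cases s with
      | nil => simp [pvScan, pvPhrases, pvRep]
      | cons c t => exact pv_case k ih c t hs
  intro s
  exact main s.length s le_rfl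

-- String-level: A's filtered value equals B's filtered value.
lemma pv_filtered_eq (s : String) :
    (["I estimate", "probably", "approximately", "I guess", "might be", "could be around",
      "seems like"].foldl (fun f p => PySem.Str.replace f p "[DATA REQUIRED]") s)
    = String.ofList (pvScan s.toList) := by
  simp only [List.foldl_cons, List.foldl_nil]
  simp only [PySem.Str.replace, String.toList_ofList]
  rw [pv_replace_eq _ _ _ (by decide), pv_replace_eq _ _ _ (by decide),
    pv_replace_eq _ _ _ (by decide), pv_replace_eq _ _ _ (by decide),
    pv_replace_eq _ _ _ (by decide), pv_replace_eq _ _ _ (by decide),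
    pv_replace_eq _ _ _ (by decide)]
  have := pv_chain_eq_scan s.toList
  simp only [pvPhrases, List.foldl_cons, List.foldl_nil] at this
  rw [← this]
  rfl

-- ===== VERDICT (by name: the statement is the Claim_ definition above) =====
theorem apply_anti_hallucination_filters_spec : Claim_equal_apply_anti_hallucination_filters := by
  intro response _
  unfold Spec_apply_anti_hallucination_filters
  unfold apply_anti_hallucination_filters apply_anti_hallucination_filters_alt
  rw [pv_filtered_eq response]
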